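-- pv_equiv track=rewrite | github.com/SigurdTorsnes/metahueristics-project | helpers.py | find_vehicle_of_call
-- ===== SOURCE A (Python) =====
-- def find_vehicle_of_call(solution,call):
--     call_index = solution.index(call)
--     separator_indices = [i for i, x in enumerate(solution) if x == 0]
--     vehicle_id= 0
--     for i in separator_indices:
--         if i > call_index:
--             break
--         vehicle_id += 1
--     return vehicle_id
-- ===== SOURCE B (Python) =====
-- def find_vehicle_of_call(solution, call):
--     vehicle_id = 0
--     for x in solution:
--         if x == 0:
--             vehicle_id += 1
--         if x == call:
--             return vehicle_id
--     raise ValueError(f"{call} is not in list")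
-- ===== Notes on version B (the rewrite author's own statement) =====
-- stated objective: simpler
-- what changed: Replaces A's three passes (.index, enumerate-based separator-index list, break loop over those indices) by one single scan that counts zeros and returns the count when the call is reached.
import Mathlib
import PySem

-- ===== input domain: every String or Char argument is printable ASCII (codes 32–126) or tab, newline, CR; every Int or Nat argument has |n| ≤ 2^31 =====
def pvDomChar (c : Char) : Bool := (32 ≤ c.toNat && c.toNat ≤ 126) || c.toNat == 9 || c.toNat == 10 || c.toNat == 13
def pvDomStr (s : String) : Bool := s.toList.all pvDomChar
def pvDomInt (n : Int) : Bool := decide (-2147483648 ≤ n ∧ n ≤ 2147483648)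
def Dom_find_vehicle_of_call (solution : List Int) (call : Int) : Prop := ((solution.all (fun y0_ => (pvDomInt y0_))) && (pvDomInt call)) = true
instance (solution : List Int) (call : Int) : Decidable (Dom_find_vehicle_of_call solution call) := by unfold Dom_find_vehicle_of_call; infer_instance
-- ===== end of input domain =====

-- B replaces A's three passes (.index, separator-index list, break loop) by one single
-- zero-counting scan; same asymptotic cost, simpler code. Both raise ValueError when the
-- call is absent (outside Pre_).

-- ===== PORT A =====
-- the 'for i in separator_indices: if i > call_index: break; vehicle_id += 1' loop
def pvLoopA : List Int → Int → Int → Int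
  | [], _, v => v
  | i :: rest, ci, v => if i > ci then v else pvLoopA rest ci (v + 1)

def find_vehicle_of_call (solution : List Int) (call : Int) : Int :=
  match PySem.List.index? solution call with
  | none => 0  -- unreachable under Pre_ (Python raises ValueError)
  | some ci =>
    let separator_indices :=
      ((PySem.List.enumerate solution).filter (fun p => p.2 == 0)).map (·.1)
    pvLoopA separator_indices (ci : Int) 0

-- ===== PORT B =====
def pvScanB (call : Int) : List Int → Int → Int
  | [], v => v  -- unreachable under Pre_ (Source B raises ValueError)
  | x :: xs, v =>
    let v' := if x == 0 then v + 1 else v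
    if x == call then v' else pvScanB call xs v'

def find_vehicle_of_call_alt (solution : List Int) (call : Int) : Int :=
  pvScanB call solution 0

-- ===== PRECONDITION & SPEC =====
-- Pre_: exactly the inputs where Python A returns (otherwise .index raises ValueError)
def Pre_find_vehicle_of_call (solution : List Int) (call : Int) : Prop := call ∈ solution
instance (solution : List Int) (call : Int) : Decidable (Pre_find_vehicle_of_call solution call) := by unfold Pre_find_vehicle_of_call; infer_instance
def pvWitness_find_vehicle_of_call : List Int × Int := ([0, 3, 0, 5, 7], 5)

def Spec_find_vehicle_of_call (solution : List Int) (call : Int) (out : Int) : Prop := out = find_vehicle_of_call_alt solution call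
instance (solution : List Int) (call : Int) (out : Int) : Decidable (Spec_find_vehicle_of_call solution call out) := by unfold Spec_find_vehicle_of_call; infer_instance

-- ===== CLAIM (what is proved, stated in full; the proofs are below) =====
def Claim_equal_find_vehicle_of_call : Prop := ∀ (solution : List Int) (call : Int), Dom_find_vehicle_of_call solution call → Pre_find_vehicle_of_call solution call → Spec_find_vehicle_of_call solution call (find_vehicle_of_call solution call)

-- ===== LEMMAS AND PROOFS =====

-- the separator-index list of A, parameterised by the enumerate start offset
def pvSeps (s : Int) (xs : List Int) : List Int :=
  ((PySem.List.enumerate xs s).filter (fun p => p.2 == 0)).map (·.1)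

lemma pvSeps_nil (s : Int) : pvSeps s [] = [] := rfl

lemma pvSeps_cons (s x : Int) (xs : List Int) :
    pvSeps s (x :: xs) = (if x == 0 then [s] else []) ++ pvSeps (s + 1) xs := by
  simp only [pvSeps, PySem.List.enumerate_cons, List.filter_cons]
  by_cases h : x = 0 <;> simp [h]

-- every index in pvSeps s xs is ≥ s, so a bound ci < s breaks immediately
lemma pvLoopA_skip (xs : List Int) : ∀ (s ci v : Int), ci < s →
    pvLoopA (pvSeps s xs) ci v = v := by
  induction xs with
  | nil => intro s ci v _; simp [pvSeps_nil, pvLoopA]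
  | cons x xs ih =>
    intro s ci v h
    rw [pvSeps_cons]
    by_cases hx : x = 0
    · simp only [hx, beq_self_eq_true, if_pos, List.singleton_append, pvLoopA]
      rw [if_pos (by omega)]
    · simp only [beq_iff_eq, hx, if_neg, not_false_iff, List.nil_append]
      exact ih (s + 1) ci v (by omega)

-- main invariant: A's loop over the separator indices, started at offset s and bound
-- s + (first index of call in xs), computes exactly B's single scan from accumulator v
lemma pvKey (xs : List Int) : ∀ (call s v : Int) (j : Nat),
    List.idxOf? call xs = some j →
    pvLoopA (pvSeps s xs) (s + (j : Int)) v = pvScanB call xs v := by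
  induction xs with
  | nil => intro call s v j h; simp [List.idxOf?] at h
  | cons x xs ih =>
    intro call s v j h
    rw [pvSeps_cons]
    by_cases hc : x = call
    · have hj : j = 0 := by
        simp [List.idxOf?_cons, hc] at h; omega
      subst hj hc
      push_cast
      by_cases hx : x = 0
      · simp only [hx, beq_self_eq_true, if_pos, List.singleton_append, pvLoopA, pvScanB]
        rw [if_neg (by omega), pvLoopA_skip xs (s + 1) (s + 0) (v + 1) (by omega)]
      · simp only [beq_iff_eq, hx, if_neg, not_false_iff, List.nil_append, pvScanB]
        exact pvLoopA_skip xs (s + 1) (s + 0) v (by omega)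
    · have hxs : ∃ j', List.idxOf? call xs = some j' ∧ j = j' + 1 := by
        rw [List.idxOf?_cons] at h
        rw [if_neg (by simpa using hc)] at h
        rcases hm : List.idxOf? call xs with _ | j'
        · rw [hm] at h; simp at h
        · rw [hm] at h; simp at h; exact ⟨j', rfl, by omega⟩
      obtain ⟨j', hj', rfl⟩ := hxs
      by_cases hx : x = 0
      · simp only [hx, beq_self_eq_true, if_pos, List.singleton_append, pvLoopA, pvScanB]
        rw [if_neg (by omega)]
        push_cast
        rw [show s + ((j' : Int) + 1) = s + 1 + (j' : Int) by ring,
            ih call (s + 1) (v + 1) j' hj']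
        have h0 : (0 : Int) ≠ call := hx ▸ hc
        simp [h0]
      · simp only [beq_iff_eq, hx, if_neg, not_false_iff, List.nil_append, pvScanB]
        push_cast
        rw [show s + ((j' : Int) + 1) = s + 1 + (j' : Int) by ring,
            ih call (s + 1) v j' hj']
        simp [hc]

-- ===== VERDICT (by name: the statement is the Claim_ definition above) =====
theorem find_vehicle_of_call_spec : Claim_equal_find_vehicle_of_call := by
  intro solution call _ hpre
  unfold Spec_find_vehicle_of_call find_vehicle_of_call find_vehicle_of_call_alt
  have hmem : call ∈ solution := hpre
  obtain ⟨j, hj⟩ := Option.isSome_iff_exists.mp (List.isSome_idxOf?.mpr hmem)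
  unfold PySem.List.index?
  rw [hj]
  have := pvKey solution call 0 0 j hj
  simpa [pvSeps] using this
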